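-- pv_equiv track=rewrite | github.com/brianfaires/crawl-rc | build/standalone_feature.py | _extract_function_block
-- ===== SOURCE A (Python) =====
-- from typing import Set, Dict, List, Tuple, Optional
--
-- def _extract_function_block(lines: List[str], start_idx: int) -> List[str]:
--     """Extract a complete function block, preserving comments on closing braces."""
--     result = []
--     i = start_idx
--
--     # Get initial indentation
--     initial_indent = len(lines[i]) - len(lines[i].lstrip())
--
--     # Track function/end pairs using indentation
--     in_function = True
--     result.append(lines[i])  # Add function declaration
--     i += 1
--
--     while i < len(lines):
--         line = lines[i]
--         if not line.strip():  # Empty line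
--             result.append(line)
--             i += 1
--             continue
--
--         current_indent = len(line) - len(line.lstrip())
--
--         # If we hit a line at the same or less indentation as the function declaration
--         # and it's not a comment, we're done (unless it's an 'end' keyword)
--         if current_indent <= initial_indent and line.strip() and not line.strip().startswith('--'):
--             # Check if it's an 'end' that closes our function
--             if line.strip() == 'end' and current_indent == initial_indent:
--                 result.append(line)
--                 break
--             # Otherwise, we've moved past the function
--             break
--
--         result.append(line)
--         i += 1
--
--     return result
-- ===== SOURCE B (Python) =====
-- def _extract_function_block(lines, start_idx):
--     """Recursive structural version: recurse over the tail list, building by cons."""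
--     first = lines[start_idx]
--     initial_indent = len(first) - len(first.lstrip())
--
--     def go(rest):
--         if not rest:
--             return []
--         line, tail = rest[0], rest[1:]
--         s = line.strip()
--         if not s:  # blank lines belong to the block
--             return [line] + go(tail)
--         indent = len(line) - len(line.lstrip())
--         if indent <= initial_indent and not s.startswith('--'):
--             # block boundary: keep a closing `end` at the same indent, else nothing
--             return [line] if (s == 'end' and indent == initial_indent) else []
--         return [line] + go(tail)
--
--     return [first] + go(lines[start_idx + 1:])
-- ===== Notes on version B (the rewrite author's own statement) =====
-- stated objective: alternative
-- what changed: B is a recursive structural traversal: it recurses over the tail list lines[start_idx+1:] element by element (no indices, no accumulator, no while loop), building the result front-to-back by cons, versus A's index-driven while loop that appends into a mutable accumulator.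
-- outside the precondition, e.g. on _extract_function_block(['    y', '  a', ''], -2): A returns ['  a', '', '    y'], B returns ['  a', '']
import Mathlib
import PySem

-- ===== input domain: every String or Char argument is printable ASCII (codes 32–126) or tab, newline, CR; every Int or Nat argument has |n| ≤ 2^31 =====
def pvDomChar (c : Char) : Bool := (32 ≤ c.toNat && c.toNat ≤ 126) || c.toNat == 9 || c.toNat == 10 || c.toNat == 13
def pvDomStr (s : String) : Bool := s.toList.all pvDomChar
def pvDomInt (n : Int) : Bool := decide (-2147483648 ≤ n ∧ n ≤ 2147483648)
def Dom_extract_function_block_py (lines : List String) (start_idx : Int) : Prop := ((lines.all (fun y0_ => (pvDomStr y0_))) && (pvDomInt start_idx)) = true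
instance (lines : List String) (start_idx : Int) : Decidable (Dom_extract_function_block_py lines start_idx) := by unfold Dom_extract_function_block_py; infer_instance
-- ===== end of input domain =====

-- B replaces A's index-driven while loop with mutable accumulator by a structural recursion
-- over the tail list, building the result front-to-back by cons (objective: alternative).

-- len(line) - len(line.lstrip()), the leading-whitespace count both versions compute
def pvIndent (line : String) : Int :=
  (PySem.Str.len line : Int) - (PySem.Str.len (PySem.Str.lstrip line) : Int)

-- ===== PORT A =====
-- the `while i < len(lines)` loop of A, fuel-bounded; `result.append` is `++ [line]`
def pvAloop (lines : List String) (initialIndent : Int) : Nat → Int → List String → List String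
  | 0, _, result => result
  | fuel + 1, i, result =>
    if i < (lines.length : Int) then
      match PySem.List.pyGet? lines i with
      | none => result  -- unreachable while 0 ≤ i < len
      | some line =>
        if PySem.Str.strip line = "" then
          pvAloop lines initialIndent fuel (i + 1) (result ++ [line])
        else
          let currentIndent := pvIndent line
          if currentIndent ≤ initialIndent ∧ PySem.Str.strip line ≠ "" ∧
             PySem.Str.startswith (PySem.Str.strip line) "--" = false then
            if PySem.Str.strip line = "end" ∧ currentIndent = initialIndent then
              result ++ [line]
            else
              result
          else
            pvAloop lines initialIndent fuel (i + 1) (result ++ [line])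
    else result

def extract_function_block_py (lines : List String) (start_idx : Int) : List String :=
  match PySem.List.pyGet? lines start_idx with
  | none => []  -- Python raises IndexError here (excluded by Pre_)
  | some first =>
    let initialIndent := pvIndent first
    pvAloop lines initialIndent (2 * lines.length + 1) (start_idx + 1) [first]

-- ===== PORT B =====
-- B's recursive helper `go`: structural recursion over the remaining lines, cons-building
def pvBgo (initialIndent : Int) : List String → List String
  | [] => []
  | line :: tail =>
    if PySem.Str.strip line = "" then
      line :: pvBgo initialIndent tail
    else if pvIndent line ≤ initialIndent ∧
            PySem.Str.startswith (PySem.Str.strip line) "--" = false then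
      if PySem.Str.strip line = "end" ∧ pvIndent line = initialIndent then [line] else []
    else
      line :: pvBgo initialIndent tail

def extract_function_block_py_alt (lines : List String) (start_idx : Int) : List String :=
  match PySem.List.pyGet? lines start_idx with
  | none => []  -- B raises IndexError here too (excluded by Pre_)
  | some first =>
    first :: pvBgo (pvIndent first) (PySem.List.slice lines (some (start_idx + 1)) none)

-- ===== PRECONDITION & SPEC =====
-- Pre_ excludes start_idx outside [0, len(lines)): out of range A raises IndexError, and for a
-- negative in-range start_idx A's negative-index wraparound rescans the list from the front,
-- an accident of Python indexing no caller would specify either way.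
def Pre_extract_function_block_py (lines : List String) (start_idx : Int) : Prop :=
  0 ≤ start_idx ∧ start_idx < (lines.length : Int)
instance (lines : List String) (start_idx : Int) : Decidable (Pre_extract_function_block_py lines start_idx) := by unfold Pre_extract_function_block_py; infer_instance

def pvWitness_extract_function_block_py : List String × Int := (["function f()", "  x", "end"], 0)

def Spec_extract_function_block_py (lines : List String) (start_idx : Int) (out : List String) : Prop := out = extract_function_block_py_alt lines start_idx
instance (lines : List String) (start_idx : Int) (out : List String) : Decidable (Spec_extract_function_block_py lines start_idx out) := by unfold Spec_extract_function_block_py; infer_instance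

-- ===== CLAIM =====
def Claim_equal_extract_function_block_py : Prop := ∀ (lines : List String) (start_idx : Int), Dom_extract_function_block_py lines start_idx → Pre_extract_function_block_py lines start_idx → Spec_extract_function_block_py lines start_idx (extract_function_block_py lines start_idx)

-- ===== LEMMAS AND PROOFS =====

lemma pvAloop_step (lines : List String) (ind : Int) (fuel i : Nat) (acc : List String)
    (hi : i < lines.length) :
    pvAloop lines ind (fuel + 1) (i : Int) acc =
      if PySem.Str.strip lines[i] = "" then
        pvAloop lines ind fuel ((i : Int) + 1) (acc ++ [lines[i]])
      else if pvIndent lines[i] ≤ ind ∧ PySem.Str.strip lines[i] ≠ "" ∧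
              PySem.Str.startswith (PySem.Str.strip lines[i]) "--" = false then
        if PySem.Str.strip lines[i] = "end" ∧ pvIndent lines[i] = ind then acc ++ [lines[i]]
        else acc
      else pvAloop lines ind fuel ((i : Int) + 1) (acc ++ [lines[i]]) := by
  have hlt : (i : Int) < (lines.length : Int) := by exact_mod_cast hi
  rw [pvAloop]
  rw [if_pos hlt]
  have hget : PySem.List.pyGet? lines (i : Int) = some lines[i] := by
    rw [PySem.List.pyGet?_natCast, List.getElem?_eq_getElem hi]
  rw [hget]

-- A's loop, started at index i with enough fuel, produces acc followed by B's recursion on the tail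
lemma pvAloop_eq (lines : List String) (ind : Int) :
    ∀ (fuel i : Nat) (acc : List String), lines.length - i ≤ fuel →
      pvAloop lines ind fuel (i : Int) acc = acc ++ pvBgo ind (lines.drop i) := by
  intro fuel
  induction fuel with
  | zero =>
    intro i acc hf
    have hge : lines.length ≤ i := by omega
    rw [pvAloop, List.drop_eq_nil_of_le hge]
    simp [pvBgo]
  | succ fuel ih =>
    intro i acc hf
    by_cases hi : i < lines.length
    · have hdrop : lines.drop i = lines[i] :: lines.drop (i + 1) :=
        (List.getElem_cons_drop hi).symm
      have hcast : (i : Int) + 1 = ((i + 1 : Nat) : Int) := by push_cast; ring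
      rw [pvAloop_step lines ind fuel i acc hi, hdrop, pvBgo]
      by_cases hs : PySem.Str.strip lines[i] = ""
      · rw [if_pos hs, if_pos hs, hcast, ih (i + 1) (acc ++ [lines[i]]) (by omega)]
        simp
      · rw [if_neg hs, if_neg hs]
        by_cases hc : pvIndent lines[i] ≤ ind ∧
            PySem.Str.startswith (PySem.Str.strip lines[i]) "--" = false
        · rw [if_pos ⟨hc.1, hs, hc.2⟩, if_pos hc]
          by_cases he : PySem.Str.strip lines[i] = "end" ∧ pvIndent lines[i] = ind
          · rw [if_pos he, if_pos he]
          · rw [if_neg he, if_neg he]; simp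
        · rw [if_neg (fun h : _ ∧ _ ∧ _ => hc ⟨h.1, h.2.2⟩)]
          rw [if_neg hc]
          rw [hcast, ih (i + 1) (acc ++ [lines[i]]) (by omega)]
          simp
    · have hge : lines.length ≤ i := by omega
      have h1 : ¬ ((i : Int) < (lines.length : Int)) := by exact_mod_cast not_lt.mpr hge
      rw [pvAloop, if_neg h1, List.drop_eq_nil_of_le hge]
      simp [pvBgo]

-- ===== VERDICT =====
theorem extract_function_block_py_spec : Claim_equal_extract_function_block_py := by
  intro lines start_idx _ hpre
  obtain ⟨h0, hlt⟩ := hpre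
  obtain ⟨n, rfl⟩ : ∃ m : Nat, start_idx = (m : Int) := ⟨start_idx.toNat, (Int.toNat_of_nonneg h0).symm⟩
  have hn : n < lines.length := by exact_mod_cast hlt
  have hget : PySem.List.pyGet? lines (n : Int) = some lines[n] := by
    rw [PySem.List.pyGet?_natCast, List.getElem?_eq_getElem hn]
  unfold Spec_extract_function_block_py extract_function_block_py extract_function_block_py_alt
  rw [hget]
  simp only
  have hcast : (n : Int) + 1 = ((n + 1 : Nat) : Int) := by push_cast; ring
  rw [hcast, PySem.List.slice_from_natCast,
    pvAloop_eq lines (pvIndent lines[n]) (2 * lines.length + 1) (n + 1) [lines[n]] (by omega)]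
  rfl
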